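-- pv_equiv track=rewrite | github.com/Farit/Playground | leetcode/valid_sudoku/solution_one.py | check
-- ===== SOURCE A (Python) =====
-- from typing import List
--
-- def check(
--         row_left: int, col_left: int, row_right: int, col_right:int,
--         board: List[List[str]]
-- ) -> bool:
--     seen = set()
--     for r in range(row_left, row_right + 1):
--         for c in range(col_left, col_right + 1):
--             if board[r][c] == '.':
--                 continue
--             if board[r][c] in seen:
--                 return False
--             seen.add(board[r][c])
--     return True
-- ===== SOURCE B (Python) =====
-- from typing import List
--
-- def check(
--         row_left: int, col_left: int, row_right: int, col_right: int,
--         board: List[List[str]]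
-- ) -> bool:
--     vals = sorted(board[r][c]
--                   for r in range(row_left, row_right + 1)
--                   for c in range(col_left, col_right + 1)
--                   if board[r][c] != '.')
--     return all(x != y for x, y in zip(vals, vals[1:]))
-- ===== Notes on version B (the rewrite author's own statement) =====
-- stated objective: alternative
-- what changed: Detects duplicates by sorting all non-'.' subgrid values and scanning adjacent pairs for equality, instead of A's incremental hash-set membership test with early return; no set is used at all.
-- outside the precondition, e.g. on check(0, 0, 5, 0, [['1'], ['1']]): A returns False, B raises IndexError
import Mathlib
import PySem

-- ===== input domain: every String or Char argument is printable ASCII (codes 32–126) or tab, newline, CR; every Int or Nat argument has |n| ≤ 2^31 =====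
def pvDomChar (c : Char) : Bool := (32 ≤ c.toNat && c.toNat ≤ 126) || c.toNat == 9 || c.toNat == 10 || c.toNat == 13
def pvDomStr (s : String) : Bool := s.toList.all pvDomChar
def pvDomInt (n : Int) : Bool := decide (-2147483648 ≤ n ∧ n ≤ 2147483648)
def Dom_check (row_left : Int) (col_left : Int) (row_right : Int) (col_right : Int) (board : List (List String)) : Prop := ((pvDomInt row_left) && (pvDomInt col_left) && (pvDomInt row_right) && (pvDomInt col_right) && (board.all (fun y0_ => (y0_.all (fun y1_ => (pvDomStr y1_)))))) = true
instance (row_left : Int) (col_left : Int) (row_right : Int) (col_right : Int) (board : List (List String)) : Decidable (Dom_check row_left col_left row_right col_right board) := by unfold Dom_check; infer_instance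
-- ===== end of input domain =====

-- B detects duplicates by sorting the non-'.' values and scanning adjacent pairs for equality,
-- replacing A's incremental seen-set with early return (objective: alternative algorithm).

-- board[r][c] with Python index semantics (negative wrap); inside Pre_ the defaults are never taken
def pvCell (board : List (List String)) (r c : Int) : String :=
  PySem.List.pyGetD (PySem.List.pyGetD board r []) c ""

-- ===== PORT A =====
-- A's inner 'for c' loop: threads the seen set, none = the 'return False' exit
def checkInner (board : List (List String)) (r : Int) :
    List Int → PySem.Set String → Option (PySem.Set String)
  | [], seen => some seen
  | c :: cs, seen =>
    if pvCell board r c = "." then checkInner board r cs seen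
    else if pvCell board r c ∈ seen then none
    else checkInner board r cs (PySem.Set.add seen (pvCell board r c))

-- A's outer 'for r' loop; the column range is rebuilt per row, as Python's inner 'for' does
def checkOuter (board : List (List String)) (col_left col_right : Int) :
    List Int → PySem.Set String → Option (PySem.Set String)
  | [], seen => some seen
  | r :: rs, seen =>
    match checkInner board r (PySem.List.pyRange col_left (col_right + 1) 1) seen with
    | none => none
    | some s => checkOuter board col_left col_right rs s

def check (row_left : Int) (col_left : Int) (row_right : Int) (col_right : Int) (board : List (List String)) : Bool :=
  (checkOuter board col_left col_right
    (PySem.List.pyRange row_left (row_right + 1) 1) PySem.Set.empty).isSome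

-- ===== PORT B =====
-- sorted(generator) → PySem.List.sorted; zip(vals, vals[1:]) → vals.zip (slice vals 1:); all(x != y ...)
def check_alt (row_left : Int) (col_left : Int) (row_right : Int) (col_right : Int) (board : List (List String)) : Bool :=
  let vals := PySem.List.sorted
    ((PySem.List.pyRange row_left (row_right + 1) 1).flatMap (fun r =>
      (PySem.List.pyRange col_left (col_right + 1) 1).filterMap (fun c =>
        if pvCell board r c = "." then none else some (pvCell board r c))))
    (fun x => x) false
  (vals.zip (PySem.List.slice vals (some 1) none)).all (fun p => p.1 != p.2)

-- ===== PRECONDITION & SPEC =====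
-- Excludes the inputs whose index range leaves the board: A raises IndexError there, except in
-- runs where an early 'return False' fires before the bad index is reached (B raises there),
-- which are conservatively excluded too.
def Pre_check (row_left : Int) (col_left : Int) (row_right : Int) (col_right : Int) (board : List (List String)) : Prop :=
  row_right < row_left ∨ col_right < col_left ∨
    ((-(board.length : Int) ≤ row_left ∧ row_right < (board.length : Int)) ∧
     ∀ r ∈ PySem.List.pyRange row_left (row_right + 1) 1,
       (-(((PySem.List.pyGetD board r []).length : Int)) ≤ col_left ∧
        col_right < ((PySem.List.pyGetD board r []).length : Int)))
instance (row_left : Int) (col_left : Int) (row_right : Int) (col_right : Int) (board : List (List String)) : Decidable (Pre_check row_left col_left row_right col_right board) := by unfold Pre_check; infer_instance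

def pvWitness_check : Int × Int × Int × Int × List (List String) :=
  (0, 0, 1, 1, [["5", "."], [".", "5"]])

def Spec_check (row_left : Int) (col_left : Int) (row_right : Int) (col_right : Int) (board : List (List String)) (out : Bool) : Prop := out = check_alt row_left col_left row_right col_right board
instance (row_left : Int) (col_left : Int) (row_right : Int) (col_right : Int) (board : List (List String)) (out : Bool) : Decidable (Spec_check row_left col_left row_right col_right board out) := by unfold Spec_check; infer_instance

-- ===== CLAIM (what is proved, stated in full; the proofs are below) =====
def Claim_equal_check : Prop := ∀ (row_left : Int) (col_left : Int) (row_right : Int) (col_right : Int) (board : List (List String)), Dom_check row_left col_left row_right col_right board → Pre_check row_left col_left row_right col_right board → Spec_check row_left col_left row_right col_right board (check row_left col_left row_right col_right board)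

-- ===== LEMMAS AND PROOFS =====

-- the non-'.' values of one row segment, in order
def rowVals (board : List (List String)) (r : Int) (cols : List Int) : List String :=
  cols.filterMap (fun c => if pvCell board r c = "." then none else some (pvCell board r c))

-- A's whole computation abstracted to a single scan over a value list
def scanVals : List String → PySem.Set String → Option (PySem.Set String)
  | [], seen => some seen
  | v :: vs, seen => if v ∈ seen then none else scanVals vs (PySem.Set.add seen v)

theorem checkInner_eq_scan (board : List (List String)) (r : Int) :
    ∀ (cs : List Int) (seen : PySem.Set String),
      checkInner board r cs seen = scanVals (rowVals board r cs) seen := by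
  intro cs
  induction cs with
  | nil => intro seen; rfl
  | cons c cs ih =>
    intro seen
    by_cases h : pvCell board r c = "."
    · simp [checkInner, rowVals, h, ih]
    · by_cases hm : pvCell board r c ∈ seen
      · simp [checkInner, rowVals, scanVals, h, hm]
      · simp [checkInner, rowVals, scanVals, h, hm, ih]

theorem scanVals_append (xs ys : List String) :
    ∀ seen, scanVals (xs ++ ys) seen = (scanVals xs seen).bind (fun s => scanVals ys s) := by
  induction xs with
  | nil => intro seen; rfl
  | cons x xs ih =>
    intro seen
    by_cases hm : x ∈ seen
    · simp [scanVals, hm]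
    · simp [scanVals, hm, ih]

theorem checkOuter_eq_scan (board : List (List String)) (col_left col_right : Int) :
    ∀ (rs : List Int) (seen : PySem.Set String),
      checkOuter board col_left col_right rs seen
        = scanVals (rs.flatMap (fun r =>
            rowVals board r (PySem.List.pyRange col_left (col_right + 1) 1))) seen := by
  intro rs
  induction rs with
  | nil => intro seen; rfl
  | cons r rs ih =>
    intro seen
    rw [List.flatMap_cons, scanVals_append]
    rw [checkOuter, checkInner_eq_scan]
    cases h : scanVals (rowVals board r (PySem.List.pyRange col_left (col_right + 1) 1)) seen with
    | none => simp
    | some s => simp [ih]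

theorem scanVals_isSome (vs : List String) :
    ∀ seen : PySem.Set String,
      (scanVals vs seen).isSome = true ↔ vs.Nodup ∧ ∀ v ∈ vs, v ∉ seen := by
  induction vs with
  | nil => intro seen; simp [scanVals]
  | cons v vs ih =>
    intro seen
    by_cases hm : v ∈ seen
    · constructor
      · intro h
        rw [scanVals, if_pos hm] at h
        simp at h
      · rintro ⟨_, hall⟩
        exact absurd hm (hall v (by simp))
    · rw [scanVals, if_neg hm, ih]
      constructor
      · rintro ⟨hnd, hall⟩
        refine ⟨List.nodup_cons.mpr ⟨?_, hnd⟩, ?_⟩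
        · intro hvv
          exact (hall v hvv) ((PySem.Set.mem_add seen v v).mpr (Or.inr rfl))
        · intro w hw
          rcases List.mem_cons.mp hw with hw | hw
          · rw [hw]; exact hm
          · intro hws
            exact (hall w hw) ((PySem.Set.mem_add seen v w).mpr (Or.inl hws))
      · rintro ⟨hnd, hall⟩
        refine ⟨(List.nodup_cons.mp hnd).2, ?_⟩
        intro w hw hwadd
        rcases (PySem.Set.mem_add seen v w).mp hwadd with hws | hwv
        · exact (hall w (by simp [hw])) hws
        · rw [hwv] at hw
          exact (List.nodup_cons.mp hnd).1 hw

-- on a ≤-sorted list, adjacent pairs all distinct ↔ the list has no duplicates at all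
theorem adj_ne_iff_nodup :
    ∀ (l : List String), l.Pairwise (· ≤ ·) →
      ((l.zip l.tail).all (fun p => p.1 != p.2) = true ↔ l.Nodup) := by
  intro l
  induction l with
  | nil => intro _; simp
  | cons a t ih =>
    intro hp
    cases t with
    | nil => simp
    | cons b t' =>
      have hab : a ≤ b := (List.pairwise_cons.mp hp).1 b (by simp)
      have hpt : (b :: t').Pairwise (· ≤ ·) := (List.pairwise_cons.mp hp).2
      have hbt : ∀ x ∈ t', b ≤ x := fun x hx => (List.pairwise_cons.mp hpt).1 x hx
      simp only [List.tail_cons, List.zip_cons_cons, List.all_cons, Bool.and_eq_true,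
        bne_iff_ne, ne_eq]
      rw [show ((b :: t').zip t') = ((b :: t').zip (b :: t').tail) from rfl, ih hpt]
      constructor
      · rintro ⟨hne, hnd⟩
        refine List.nodup_cons.mpr ⟨?_, hnd⟩
        intro hmem
        have halt : a < b := lt_of_le_of_ne hab hne
        rcases List.mem_cons.mp hmem with h | h
        · exact hne h
        · exact absurd (lt_of_lt_of_le halt (hbt a h)) (lt_irrefl a)
      · intro hnd
        refine ⟨fun h => (List.nodup_cons.mp hnd).1 (by simp [h]), (List.nodup_cons.mp hnd).2⟩

-- ===== VERDICT (by name: the statement is the Claim_ definition above) =====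
theorem check_spec : Claim_equal_check := by
  intro rl cl rr cr board _ _
  unfold Spec_check
  rw [Bool.eq_iff_iff]
  unfold check check_alt
  rw [checkOuter_eq_scan]
  set raw := (PySem.List.pyRange rl (rr + 1) 1).flatMap (fun r =>
      (PySem.List.pyRange cl (cr + 1) 1).filterMap (fun c =>
        if pvCell board r c = "." then none else some (pvCell board r c))) with hr
  have hraw : (PySem.List.pyRange rl (rr + 1) 1).flatMap
      (fun r => rowVals board r (PySem.List.pyRange cl (cr + 1) 1)) = raw := rfl
  rw [hraw]
  have h1 : (scanVals raw PySem.Set.empty).isSome = true ↔ raw.Nodup := by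
    rw [scanVals_isSome]
    simp [PySem.Set.empty]
  rw [h1]
  show _ ↔ ((PySem.List.sorted raw (fun x => x) false).zip
      (PySem.List.slice (PySem.List.sorted raw (fun x => x) false) (some 1) none)).all
      (fun p => p.1 != p.2) = true
  set s := PySem.List.sorted raw (fun x => x) false with hs
  rw [PySem.List.slice_from_one]
  have hperm : s.Perm raw := PySem.List.sorted_perm raw (fun x => x) false
  have hpair : s.Pairwise (· ≤ ·) := by
    have := PySem.List.sorted_pairwise raw (fun x => x)
    simpa using this
  rw [adj_ne_iff_nodup s hpair, hperm.nodup_iff]
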